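-- pv_equiv track=rewrite | github.com/JofredG/TIP102 | u2_s2_a1.py | is_authentic_collection
-- ===== SOURCE A (Python) =====
-- def is_authentic_collection(art_pieces):
--     freq = {}
--     #add to dictionary
--     for item in art_pieces:
--         if item in freq:
--             freq[item] += 1
--         else:
--             freq[item] = 1
--
--     #find max key to check frequency of 2 later
--     max_key = max(art_pieces)
--     #for every key,
--     for key in freq:
--         #if it isn't the max key, if the frequncy isn't 1, return False
--         if key != max_key:
--             if freq[key] != 1:
--                 return False
--         #if it IS the max key, if the frequncy isn't 2, return False
--         elif key == max_key:
--             if freq[key] != 2: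
--                 return False
--     return True
-- ===== SOURCE B (Python) =====
-- def is_authentic_collection(art_pieces):
--     # max() first, so empty input raises ValueError exactly like A
--     max_key = max(art_pieces)
--
--     def scan(xs):
--         if not xs:
--             return True
--         x = xs[0]
--         j = 1
--         while j < len(xs) and xs[j] == x:
--             j += 1
--         need = 2 if x == max_key else 1
--         return j == need and scan(xs[j:])
--
--     return scan(sorted(art_pieces))
-- ===== Notes on version B (the rewrite author's own statement) =====
-- stated objective: alternative
-- what changed: Replaces the frequency-dictionary build plus per-key frequency scan with a sort-then-scan of maximal runs of equal values (run length must be 2 for the max, 1 otherwise).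
import Mathlib
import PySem

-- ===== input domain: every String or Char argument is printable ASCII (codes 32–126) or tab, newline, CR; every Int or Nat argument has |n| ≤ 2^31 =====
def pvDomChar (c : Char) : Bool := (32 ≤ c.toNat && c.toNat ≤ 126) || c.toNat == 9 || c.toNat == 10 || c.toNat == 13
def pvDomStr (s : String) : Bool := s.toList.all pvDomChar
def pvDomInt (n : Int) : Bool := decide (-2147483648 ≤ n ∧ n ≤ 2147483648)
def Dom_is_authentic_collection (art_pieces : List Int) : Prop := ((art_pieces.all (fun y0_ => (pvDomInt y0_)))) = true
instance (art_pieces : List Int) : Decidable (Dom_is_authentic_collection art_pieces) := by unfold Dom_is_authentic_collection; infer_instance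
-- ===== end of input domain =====

-- B replaces A's frequency-dictionary-plus-key-scan with a sort-then-scan of runs; return values proved equal on nonempty input.

-- ===== PORT A =====
-- the 'for key in freq' loop with its early 'return False's
def pvCheckKeys (freq : PySem.Dict Int Int) (mx : Int) : List Int → Bool
  | [] => true
  | k :: rest =>
    if k ≠ mx then
      (if freq.getD k 0 ≠ 1 then false else pvCheckKeys freq mx rest)
    else if k = mx then
      (if freq.getD k 0 ≠ 2 then false else pvCheckKeys freq mx rest)
    else pvCheckKeys freq mx rest

-- the 'for item in art_pieces' dictionary-building loop
def pvFreq (art_pieces : List Int) : PySem.Dict Int Int :=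
  art_pieces.foldl
    (fun d item => if d.contains item then d.insert item (d.getD item 0 + 1) else d.insert item 1)
    PySem.Dict.empty

def is_authentic_collection (art_pieces : List Int) : Bool :=
  match PySem.List.max? art_pieces (fun x => x) with
  | none => false   -- Python raises ValueError here; excluded by Pre_
  | some mx => pvCheckKeys (pvFreq art_pieces) mx (pvFreq art_pieces).keys

-- ===== PORT B =====
-- Source B's 'scan': measure the leading run of equal values, check its length, recurse on the remainder
def pvRunScan (mx : Int) : List Int → Bool
  | [] => true
  | x :: rest =>
    (1 + (rest.takeWhile (fun y => y == x)).length == (if x == mx then 2 else 1))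
      && pvRunScan mx (rest.dropWhile (fun y => y == x))
termination_by l => l.length
decreasing_by
  simp only [List.length_cons]
  have := List.length_dropWhile_le (fun y => y == x) rest
  omega

def is_authentic_collection_alt (art_pieces : List Int) : Bool :=
  match PySem.List.max? art_pieces (fun x => x) with
  | none => false   -- Source B also raises ValueError here (max() first); excluded by Pre_
  | some mx => pvRunScan mx (PySem.List.sorted art_pieces (fun x => x) false)

-- ===== PRECONDITION & SPEC =====
-- Pre_ excludes only the empty list, on which both A and B raise ValueError (max of empty sequence).
def Pre_is_authentic_collection (art_pieces : List Int) : Prop := art_pieces ≠ []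
instance (art_pieces : List Int) : Decidable (Pre_is_authentic_collection art_pieces) := by
  unfold Pre_is_authentic_collection; infer_instance

def pvWitness_is_authentic_collection : List Int := [1, 2, 2]

def Spec_is_authentic_collection (art_pieces : List Int) (out : Bool) : Prop :=
  out = is_authentic_collection_alt art_pieces
instance (art_pieces : List Int) (out : Bool) : Decidable (Spec_is_authentic_collection art_pieces out) := by
  unfold Spec_is_authentic_collection; infer_instance

-- ===== CLAIM =====
def Claim_equal_is_authentic_collection : Prop :=
  ∀ (art_pieces : List Int), Dom_is_authentic_collection art_pieces →
    Pre_is_authentic_collection art_pieces →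
    Spec_is_authentic_collection art_pieces (is_authentic_collection art_pieces)

-- ===== LEMMAS AND PROOFS =====

-- the required count for value v: 2 for the max, 1 otherwise
def pvNeed (mx v : Int) : Nat := if v = mx then 2 else 1

lemma foldA_eq_counter (xs : List Int) :
    pvFreq xs = PySem.Dict.counter xs := by
  unfold pvFreq
  rw [← PySem.Dict.foldl_insert_getD_add_one_eq_counter]
  congr 1
  funext d x
  by_cases h : d.contains x = true
  · simp [h]
  · simp only [Bool.not_eq_true] at h
    simp [h, PySem.Dict.getD_of_not_contains]

lemma checkKeys_eq_all (freq : PySem.Dict Int Int) (mx : Int) (ks : List Int) :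
    pvCheckKeys freq mx ks = ks.all (fun k => freq.getD k 0 == (if k = mx then 2 else 1)) := by
  induction ks with
  | nil => rfl
  | cons k rest ih =>
    simp only [pvCheckKeys, List.all_cons, ih]
    by_cases h : k = mx
    · subst h
      by_cases h2 : freq.getD k 0 = 2 <;> simp [h2]
    · by_cases h2 : freq.getD k 0 = 1 <;> simp [h, h2]

lemma portA_iff (xs : List Int) (mx : Int)
    (hmx : PySem.List.max? xs (fun x => x) = some mx) :
    is_authentic_collection xs = true ↔ ∀ v ∈ xs, xs.count v = pvNeed mx v := by
  unfold is_authentic_collection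
  rw [foldA_eq_counter, hmx]
  show pvCheckKeys (PySem.Dict.counter xs) mx (PySem.Dict.counter xs).keys = true ↔ _
  rw [checkKeys_eq_all, PySem.Dict.keys_counter]
  simp only [List.all_eq_true, PySem.Dict.getD_counter, PySem.Set.mem_ofList, beq_iff_eq, pvNeed]
  constructor
  · intro h v hv
    have := h v hv
    split_ifs at this ⊢ <;> omega
  · intro h v hv
    have := h v hv
    split_ifs at this ⊢ <;> omega

lemma runScan_iff (mx : Int) (ys : List Int) (hs : ys.Pairwise (· ≤ ·)) :
    pvRunScan mx ys = true ↔ ∀ v ∈ ys, ys.count v = pvNeed mx v := by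
  induction hn : ys.length using Nat.strong_induction_on generalizing ys with
  | _ n ih =>
  cases ys with
  | nil => simp [pvRunScan]
  | cons x rest =>
    subst hn
    have hsplit : rest.takeWhile (fun y => y == x) ++ rest.dropWhile (fun y => y == x) = rest :=
      List.takeWhile_append_dropWhile
    set run := rest.takeWhile (fun y => y == x) with hrun
    set tail := rest.dropWhile (fun y => y == x) with htail
    have hrunx : ∀ y ∈ run, y = x := by
      intro y hy
      have := List.mem_takeWhile_imp hy
      simpa using this
    have hpx : ∀ y ∈ rest, x ≤ y := (List.pairwise_cons.mp hs).1
    have hst : tail.Pairwise (· ≤ ·) := by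
      have h1 : rest.Pairwise (· ≤ ·) := (List.pairwise_cons.mp hs).2
      exact h1.sublist (List.dropWhile_sublist _)
    have htailmem : ∀ y ∈ tail, y ∈ rest := by
      intro y hy; rw [← hsplit]; exact List.mem_append_right _ hy
    have htailgt : ∀ y ∈ tail, x < y := by
      cases he : tail with
      | nil => simp
      | cons y0 t' =>
        have hy0ne : ¬ (y0 == x) = true := by
          have := List.head?_dropWhile_not (fun y => y == x) rest
          rw [← htail, he] at this
          simpa using this
        have hy0 : x < y0 := by
          have hle : x ≤ y0 := hpx y0 (htailmem y0 (by simp [he]))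
          have : y0 ≠ x := by simpa using hy0ne
          omega
        intro y hy
        rcases List.mem_cons.mp hy with h | h
        · omega
        · have := (List.pairwise_cons.mp (he ▸ hst)).1 y h
          omega
    have hcx : (x :: rest).count x = 1 + run.length := by
      rw [← hsplit, ← List.cons_append, List.count_append]
      have h1 : (x :: run).count x = run.length + 1 := by
        rw [List.count_cons_self]
        congr 1
        exact List.count_eq_length.mpr (fun b hb => ((hrunx b hb).symm : x = b))
      have h2 : tail.count x = 0 :=
        List.count_eq_zero.mpr (fun hx => absurd (htailgt x hx) (by omega))
      rw [h1, h2]; omega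
    have hcv : ∀ v, v ≠ x → (x :: rest).count v = tail.count v := by
      intro v hv
      rw [← hsplit, ← List.cons_append, List.count_append]
      have : (x :: run).count v = 0 := by
        apply List.count_eq_zero.mpr
        intro hvmem
        rcases List.mem_cons.mp hvmem with h | h
        · exact hv h
        · exact hv (hrunx v h)
      rw [this]; omega
    have hmem : ∀ v, v ∈ (x :: rest) ↔ (v = x ∨ v ∈ tail) := by
      intro v
      constructor
      · intro hv
        rcases List.mem_cons.mp hv with h | h
        · exact Or.inl h
        · rw [← hsplit] at h
          rcases List.mem_append.mp h with h | h
          · exact Or.inl (hrunx v h)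
          · exact Or.inr h
      · rintro (h | h)
        · simp [h]
        · exact List.mem_cons_of_mem _ (htailmem v h)
    have hlen : tail.length < (x :: rest).length := by
      have h2 : tail.length ≤ rest.length := by
        rw [htail]; exact List.length_dropWhile_le _ _
      simp only [List.length_cons]
      omega
    have IH : pvRunScan mx tail = true ↔ ∀ v ∈ tail, tail.count v = pvNeed mx v :=
      ih tail.length hlen tail hst rfl
    rw [pvRunScan]
    simp only [Bool.and_eq_true, beq_iff_eq, ← hrun, ← htail, IH]
    rw [show ((if x = mx then 2 else 1 : Nat)) = pvNeed mx x from rfl]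
    constructor
    · rintro ⟨h1, h2⟩ v hv
      rcases (hmem v).mp hv with rfl | hv'
      · rw [hcx]; omega
      · have hvne : v ≠ x := by have := htailgt v hv'; omega
        rw [hcv v hvne]; exact h2 v hv'
    · intro h
      refine ⟨?_, ?_⟩
      · have := h x (by simp)
        rw [hcx] at this; omega
      · intro v hv
        have hvne : v ≠ x := by have := htailgt v hv; omega
        rw [← hcv v hvne]
        exact h v ((hmem v).mpr (Or.inr hv))

lemma portB_iff (xs : List Int) (mx : Int)
    (hmx : PySem.List.max? xs (fun x => x) = some mx) :
    is_authentic_collection_alt xs = true ↔ ∀ v ∈ xs, xs.count v = pvNeed mx v := by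
  unfold is_authentic_collection_alt
  rw [hmx]
  have hperm : (PySem.List.sorted xs (fun x => x) false).Perm xs := PySem.List.sorted_perm xs _ false
  rw [runScan_iff mx _ (by simpa using PySem.List.sorted_pairwise (xs := xs) (key := fun x => x))]
  constructor
  · intro h v hv
    rw [← hperm.count_eq]
    exact h v (hperm.mem_iff.mpr hv)
  · intro h v hv
    rw [hperm.count_eq]
    exact h v (hperm.mem_iff.mp hv)

-- ===== VERDICT =====
theorem is_authentic_collection_spec : Claim_equal_is_authentic_collection := by
  intro xs _ hpre
  unfold Spec_is_authentic_collection
  obtain ⟨mx, hmx⟩ : ∃ mx, PySem.List.max? xs (fun x => x) = some mx := by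
    cases h : PySem.List.max? xs (fun x => x) with
    | none => exact absurd (Iff.mp (PySem.List.max?_eq_none_iff xs (fun x => x)) h) hpre
    | some mx => exact ⟨mx, rfl⟩
  rw [Bool.eq_iff_iff, portA_iff xs mx hmx, portB_iff xs mx hmx]
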